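-- pv_equiv track=rewrite | github.com/kfuku52/genegalleon | workflow/support/format_species_inputs.py | transcript_feature_gene_token
-- ===== SOURCE A (Python) =====
-- from collections import defaultdict, deque
--
-- def transcript_feature_gene_token(features):
--     counts = defaultdict(int)
--     for feature in features:
--         token = str(feature.get("gene_token", "") or "").strip()
--         if token != "":
--             counts[token] += 1
--     if len(counts) == 0:
--         return ""
--     return sorted(counts.items(), key=lambda item: (-item[1], item[0]))[0][0]
-- ===== SOURCE B (Python) =====
-- def transcript_feature_gene_token(features):
--     tokens = []
--     for feature in features:
--         token = str(feature.get("gene_token", "") or "").strip()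
--         if token != "":
--             tokens.append(token)
--     best, best_count = "", 0
--     run, run_count = "", 0
--     for token in sorted(tokens):
--         if token == run:
--             run_count += 1
--         else:
--             run, run_count = token, 1
--         if run_count > best_count:
--             best, best_count = token, run_count
--     return best
-- ===== Notes on version B (the rewrite author's own statement) =====
-- stated objective: alternative
-- what changed: Replaces the count-dictionary plus full sort of (token,(-count,token)) items by sorting the raw token list once and scanning consecutive equal runs, keeping the first (alphabetically smallest) run of strictly greatest length; no dict of counts is built and no tuple-key sort is performed.
import Mathlib
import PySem

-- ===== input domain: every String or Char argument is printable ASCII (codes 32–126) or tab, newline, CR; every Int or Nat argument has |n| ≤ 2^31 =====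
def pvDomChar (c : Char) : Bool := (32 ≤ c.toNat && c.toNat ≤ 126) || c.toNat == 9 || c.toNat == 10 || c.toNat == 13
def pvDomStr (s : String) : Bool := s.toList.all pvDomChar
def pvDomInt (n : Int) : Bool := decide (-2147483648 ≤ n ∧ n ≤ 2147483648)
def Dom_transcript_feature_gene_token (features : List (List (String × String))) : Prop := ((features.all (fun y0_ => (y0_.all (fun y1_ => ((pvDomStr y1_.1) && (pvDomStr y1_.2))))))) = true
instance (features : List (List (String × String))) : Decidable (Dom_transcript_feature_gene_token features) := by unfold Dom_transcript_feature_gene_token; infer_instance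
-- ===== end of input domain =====

-- B replaces A's count-dictionary + tuple-key sort of the items by one sort of the raw token
-- list followed by a linear scan of consecutive equal runs (alternative decomposition, same result).


-- ===== PORT A =====
-- token = str(feature.get("gene_token", "") or "").strip()   (shared by both Pythons verbatim;
-- values are strings, so str(...) is the identity and 'v or ""' is 'if v == "" then "" else v')
def pvTok (feature : List (String × String)) : String :=
  let v := (PySem.Dict.mk feature).getD "gene_token" ""
  PySem.Str.strip (if v == "" then "" else v)

def transcript_feature_gene_token (features : List (List (String × String))) : String :=
  let counts := features.foldl (fun d f =>
      let token := pvTok f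
      if token ≠ "" then d.insert token (d.getD token 0 + 1) else d)
    (PySem.Dict.empty : PySem.Dict String Int)
  if counts.size = 0 then ""
  else ((PySem.List.sorted2 counts.items (fun it => -it.2) (fun it => it.1)).headD ("", 0)).1

-- ===== PORT B =====
def pvScanStep (s : (String × Int) × (String × Int)) (token : String) :
    (String × Int) × (String × Int) :=
  let run' := if token == s.2.1 then (s.2.1, s.2.2 + 1) else (token, (1 : Int))
  if run'.2 > s.1.2 then ((token, run'.2), run') else (s.1, run')

def transcript_feature_gene_token_alt (features : List (List (String × String))) : String :=
  let tokens := features.foldl (fun acc f =>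
      let token := pvTok f
      if token ≠ "" then acc ++ [token] else acc) ([] : List String)
  ((PySem.List.sorted tokens (fun t => t) false).foldl pvScanStep (("", 0), ("", 0))).1.1

-- ===== PRECONDITION & SPEC =====
def Spec_transcript_feature_gene_token (features : List (List (String × String))) (out : String) : Prop := out = transcript_feature_gene_token_alt features
instance (features : List (List (String × String))) (out : String) : Decidable (Spec_transcript_feature_gene_token features out) := by unfold Spec_transcript_feature_gene_token; infer_instance

-- ===== CLAIM (what is proved, stated in full; the proofs are below) =====
def Claim_equal_transcript_feature_gene_token : Prop := ∀ (features : List (List (String × String))), Dom_transcript_feature_gene_token features → Spec_transcript_feature_gene_token features (transcript_feature_gene_token features)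

-- ===== LEMMAS AND PROOFS =====

-- the cleaned non-empty token list both programs work from
def pvTokens (features : List (List (String × String))) : List String :=
  (features.filter (fun f => decide (pvTok f ≠ ""))).map pvTok

-- "t is a most frequent token, smallest among count ties"
def BestTok (T : List String) (t : String) : Prop :=
  t ∈ T ∧ (∀ u ∈ T, T.count u ≤ T.count t) ∧ (∀ u ∈ T, T.count u = T.count t → t ≤ u)

-- A's tuple comparator (-count, token), as sorted2 builds it
def pvLt (a b : String × Int) : Bool :=
  decide ((-a.2 : Int) < -b.2) || (!decide ((-b.2 : Int) < -a.2) && decide (a.1 < b.1))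

theorem pvLt_asymm (a b : String × Int) (h : pvLt a b = true) : pvLt b a = false := by
  simp [pvLt] at *
  rcases h with h | ⟨h1, h2⟩
  · exact ⟨le_of_lt h, fun hle => absurd h (not_lt.mpr hle)⟩
  · exact ⟨h1, fun _ => le_of_lt h2⟩

theorem pvLt_trans (a b c : String × Int) (h1 : pvLt a b = true) (h2 : pvLt b c = true) :
    pvLt a c = true := by
  simp [pvLt] at *
  rcases h1 with h1 | ⟨h1a, h1b⟩ <;> rcases h2 with h2 | ⟨h2a, h2b⟩
  · exact Or.inl (lt_trans h2 h1)
  · exact Or.inl (lt_of_le_of_lt h2a h1)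
  · exact Or.inl (lt_of_lt_of_le h2 h1a)
  · exact Or.inr ⟨le_trans h2a h1a, lt_trans h1b h2b⟩

theorem pairwise_insertBy (x : String × Int) (acc : List (String × Int))
    (h : acc.Pairwise (fun a b => pvLt b a = false)) :
    (PySem.List.insertBy pvLt x acc).Pairwise (fun a b => pvLt b a = false) := by
  induction acc with
  | nil => simp [PySem.List.insertBy]
  | cons y ys ih =>
    rcases List.pairwise_cons.mp h with ⟨hy, hys⟩
    have hstep : PySem.List.insertBy pvLt x (y :: ys)
        = if pvLt x y then x :: y :: ys else y :: PySem.List.insertBy pvLt x ys := rfl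
    rw [hstep]
    split_ifs with hb
    · refine List.pairwise_cons.mpr ⟨?_, h⟩
      intro z hz
      rcases List.mem_cons.mp hz with hzy | hzys
      · subst hzy; exact pvLt_asymm _ _ hb
      · by_cases hzx : pvLt z x
        · exact absurd (pvLt_trans z x y hzx hb) (by simp [hy z hzys])
        · simpa using hzx
    · refine List.pairwise_cons.mpr ⟨?_, ih hys⟩
      intro z hz
      rcases (PySem.List.mem_insertBy pvLt x z ys).mp hz with hzx | hzys
      · subst hzx; simpa using hb
      · exact hy z hzys

theorem sorted2_eq_foldl (xs : List (String × Int)) :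
    PySem.List.sorted2 xs (fun it => -it.2) (fun it => it.1) false
      = xs.foldl (fun acc y => PySem.List.insertBy pvLt y acc) [] := rfl

theorem foldl_insertBy_pairwise (xs : List (String × Int)) :
    ∀ acc : List (String × Int), acc.Pairwise (fun a b => pvLt b a = false) →
      (xs.foldl (fun acc y => PySem.List.insertBy pvLt y acc) acc).Pairwise
        (fun a b => pvLt b a = false) := by
  induction xs with
  | nil => intro acc h; simpa using h
  | cons x xs ih =>
    intro acc h
    exact ih _ (pairwise_insertBy x acc h)

theorem sorted2_pairwise' (xs : List (String × Int)) :
    (PySem.List.sorted2 xs (fun it => -it.2) (fun it => it.1) false).Pairwise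
      (fun a b => pvLt b a = false) := by
  rw [sorted2_eq_foldl]
  exact foldl_insertBy_pairwise xs [] (by simp)

theorem bestTok_unique (T : List String) (a b : String)
    (ha : BestTok T a) (hb : BestTok T b) : a = b := by
  obtain ⟨ha1, ha2, ha3⟩ := ha
  obtain ⟨hb1, hb2, hb3⟩ := hb
  have h1 := ha2 b hb1
  have h2 := hb2 a ha1
  have := ha3 b hb1 (by omega)
  have := hb3 a ha1 (by omega)
  exact le_antisymm ‹a ≤ b› ‹b ≤ a›

theorem tokensB_eq (features : List (List (String × String))) :
    features.foldl (fun acc f =>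
        let token := pvTok f
        if token ≠ "" then acc ++ [token] else acc) ([] : List String)
      = pvTokens features := by
  simpa [pvTokens] using
    PySem.List.foldl_append_ite (l := features) (p := fun f => pvTok f ≠ "") (f := pvTok)
      (acc := [])

theorem counts_eq (features : List (List (String × String))) :
    features.foldl (fun d f =>
        let token := pvTok f
        if token ≠ "" then d.insert token (d.getD token 0 + 1) else d)
      (PySem.Dict.empty : PySem.Dict String Int)
      = PySem.Dict.counter (pvTokens features) := by
  rw [show (fun (d : PySem.Dict String Int) f =>
        let token := pvTok f
        if token ≠ "" then d.insert token (d.getD token 0 + 1) else d)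
      = (fun d f => if pvTok f ≠ "" then d.insert (pvTok f) (d.getD (pvTok f) 0 + 1) else d)
      from rfl]
  rw [PySem.List.foldl_ite_eq_foldl_filter]
  rw [pvTokens, ← PySem.Dict.foldl_insert_getD_add_one_eq_counter, List.foldl_map]

theorem pvTokens_ne_empty (features : List (List (String × String))) :
    ∀ y ∈ pvTokens features, y ≠ "" := by
  intro y hy
  rcases List.mem_map.mp hy with ⟨f, hf, rfl⟩
  have := List.mem_filter.mp hf
  simpa using this.2

theorem A_best (T : List String) (hT : T ≠ []) :
    BestTok T
      (((PySem.List.sorted2 (PySem.Dict.counter T).items (fun it => -it.2) (fun it => it.1)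
          false).headD ("", 0)).1) := by
  have hitems := PySem.Dict.items_counter T
  have hperm := PySem.List.sorted2_perm (PySem.Dict.counter T).items
      (fun it : String × Int => -it.2) (fun it : String × Int => it.1) false
  have hpw := sorted2_pairwise' (PySem.Dict.counter T).items
  obtain ⟨h0, rest, hcons⟩ : ∃ h0 rest,
      PySem.List.sorted2 (PySem.Dict.counter T).items
        (fun it : String × Int => -it.2) (fun it : String × Int => it.1) false
        = h0 :: rest := by
    cases scases : PySem.List.sorted2 (PySem.Dict.counter T).items
        (fun it : String × Int => -it.2) (fun it : String × Int => it.1) false with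
    | nil =>
      exfalso
      rw [scases] at hperm
      have : (PySem.Dict.counter T).items = [] := hperm.symm.eq_nil
      rw [hitems] at this
      rcases List.exists_cons_of_ne_nil hT with ⟨t, T', hT'⟩
      have ht : t ∈ PySem.Set.ofList T := (PySem.Set.mem_ofList T t).mpr (by simp [hT'])
      rw [List.map_eq_nil_iff.mp this] at ht
      simp at ht
    | cons a l => exact ⟨a, l, rfl⟩
  rw [hcons]
  simp only [List.headD_cons]
  have hh0 : h0 ∈ (PySem.Dict.counter T).items := by
    rw [← hperm.mem_iff, hcons]; simp
  rw [hitems] at hh0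
  rcases List.mem_map.mp hh0 with ⟨t, htmem, heq⟩
  have htT : t ∈ T := (PySem.Set.mem_ofList T t).mp htmem
  have h1 : h0.1 = t := by rw [← heq]
  have h2 : h0.2 = (T.count t : Int) := by rw [← heq]
  have hmain : ∀ u ∈ T, T.count u ≤ T.count h0.1 ∧ (T.count u = T.count h0.1 → h0.1 ≤ u) := by
    intro u hu
    have humem : (u, (T.count u : Int)) ∈ (PySem.Dict.counter T).items := by
      rw [hitems]
      exact List.mem_map.mpr ⟨u, (PySem.Set.mem_ofList T u).mpr hu, rfl⟩
    have hus : (u, (T.count u : Int)) ∈ h0 :: rest := by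
      rw [← hcons]; exact hperm.mem_iff.mpr humem
    rcases List.mem_cons.mp hus with heqh | hurest
    · have hu1 : u = h0.1 := by rw [← heqh]
      exact ⟨by rw [hu1], fun _ => by rw [hu1]⟩
    · have hlt := (List.pairwise_cons.mp (hcons ▸ hpw)).1 _ hurest
      simp [pvLt] at hlt
      rw [h1, h2] at hlt
      rw [h1]
      obtain ⟨hle, htie⟩ := hlt
      constructor
      · exact_mod_cast hle
      · intro hceq
        exact String.le_iff_toList_le.mpr (htie (by exact_mod_cast le_of_eq hceq.symm))
  rw [h1] at hmain
  rw [h1]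
  exact ⟨htT, fun u hu => (hmain u hu).1, fun u hu hc => (hmain u hu).2 hc⟩

-- scan-loop invariant: P is the processed (sorted) prefix
def pvInv (P : List String) (s : (String × Int) × (String × Int)) : Prop :=
  (P = [] ∧ s = (("", 0), ("", 0))) ∨
  (P ≠ [] ∧ P.getLast? = some s.2.1 ∧ s.2.2 = (P.count s.2.1 : Int) ∧
    s.1.1 ∈ P ∧ s.1.2 = (P.count s.1.1 : Int) ∧
    (∀ u ∈ P, P.count u ≤ P.count s.1.1) ∧ (∀ u ∈ P, P.count u = P.count s.1.1 → s.1.1 ≤ u))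

theorem le_getLast_of_pairwise (P : List String) :
    P.Pairwise (· ≤ ·) → ∀ y ∈ P, ∀ l, P.getLast? = some l → y ≤ l := by
  induction P with
  | nil => intro _ y hy; simp at hy
  | cons a P ih =>
    intro hsort y hy l hl
    rcases List.pairwise_cons.mp hsort with ⟨ha, hP⟩
    cases P with
    | nil => simp at hy hl; exact le_of_eq (hy.trans hl)
    | cons b P' =>
      rw [List.getLast?_cons_cons] at hl
      rcases List.mem_cons.mp hy with rfl | hy'
      · exact le_trans (ha b (by simp)) (ih hP b (by simp) l hl)
      · exact ih hP y hy' l hl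

theorem pvInv_step (P : List String) (x : String) (hx : x ≠ "")
    (hsort : P.Pairwise (· ≤ ·)) (hord : ∀ y ∈ P, y ≤ x)
    (s : (String × Int) × (String × Int)) (h : pvInv P s) :
    pvInv (P ++ [x]) (pvScanStep s x) := by
  obtain ⟨⟨b, bc⟩, r, rc⟩ := s
  rcases h with ⟨rfl, hs⟩ | ⟨hPne, hlast, hrunc, hbmem, hbc, hmax, hmin⟩
  · -- first token: run' = (x, 1), 1 > 0, best := x
    obtain ⟨h1, h2⟩ := Prod.mk.injEq .. ▸ hs
    cases h1; cases h2
    have hxr : (x == "") = false := by simpa using hx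
    have : pvScanStep (("", 0), ("", 0)) x = ((x, 1), (x, 1)) := by
      simp [pvScanStep, hxr]
    rw [this]
    right
    refine ⟨by simp, by simp, by simp, by simp, by simp, ?_, ?_⟩ <;>
      · intro u hu
        simp at hu
        simp [hu]
  · -- P ≠ [] : b,bc,r,rc are the genuine best/run state
    simp only at hlast hrunc hbmem hbc hmax hmin
    have hrmem : r ∈ P := List.mem_of_getLast? hlast
    have hbpos : 0 < P.count b := List.count_pos_iff.mpr hbmem
    have hlast' : (P ++ [x]).getLast? = some x := List.getLast?_concat
    by_cases hxr : x = r
    · -- run continues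
      subst hxr
      have hbeq : (x == x) = true := by simp
      have hcx : (P ++ [x]).count x = P.count x + 1 := by simp [List.count_append]
      have hcne : ∀ u, u ≠ x → (P ++ [x]).count u = P.count u := by
        intro u hu
        rw [List.count_append]
        have : List.count u [x] = 0 := List.count_eq_zero.mpr (by simp [hu])
        omega
      by_cases hgt : rc + 1 > bc
      · have hstep : pvScanStep ((b, bc), (x, rc)) x = ((x, rc + 1), (x, rc + 1)) := by
          simp [pvScanStep, hgt]
        rw [hstep]
        right
        refine ⟨by simp, by simp [hlast'], by simp [hcx, hrunc], by simp, by simp [hcx, hrunc], ?_, ?_⟩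
        · intro u hu
          by_cases hux : u = x
          · simp [hux]
          · rw [hcne u hux, hcx]
            have h1 := hmax u ((List.mem_append.mp hu).resolve_right (by simp [hux]))
            have h2 := hmax x hrmem
            omega
        · intro u hu hc
          by_cases hux : u = x
          · simp [hux]
          · exfalso
            rw [hcne u hux, hcx] at hc
            have h1 := hmax u ((List.mem_append.mp hu).resolve_right (by simp [hux]))
            have h2 := hmax x hrmem
            -- bc = count b, hgt : rc + 1 > bc, hrunc : rc = count x
            rw [hbc, hrunc] at hgt
            omega
      · have hstep : pvScanStep ((b, bc), (x, rc)) x = ((b, bc), (x, rc + 1)) := by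
          simp [pvScanStep, hgt]
        rw [hstep]
        have hbx : b ≠ x := by
          intro hbx
          subst hbx
          rw [hbc, hrunc] at hgt
          omega
        right
        refine ⟨by simp, by simp [hlast'], by simp [hcx, hrunc], by simp [hbmem],
          by simp [hcne b hbx, hbc], ?_, ?_⟩
        · intro u hu
          rw [hcne b hbx]
          by_cases hux : u = x
          · subst hux
            rw [hcx]
            rw [hbc, hrunc] at hgt
            omega
          · rw [hcne u hux]
            exact hmax u ((List.mem_append.mp hu).resolve_right (by simp [hux]))
        · intro u hu hc
          rw [hcne b hbx] at hc
          by_cases hux : u = x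
          · subst hux
            exact hord b hbmem
          · rw [hcne u hux] at hc
            exact hmin u ((List.mem_append.mp hu).resolve_right (by simp [hux])) hc
    · -- new run: x ∉ P, run' = (x, 1), 1 > bc never (bc ≥ 1)
      have hxP : x ∉ P := by
        intro hxP
        exact hxr (le_antisymm
          (le_getLast_of_pairwise P hsort x hxP r hlast) (hord r hrmem))
      have hbeq : (x == r) = false := by simp [hxr]
      have hcx : (P ++ [x]).count x = 1 := by
        rw [List.count_append, List.count_eq_zero.mpr hxP]
        simp
      have hcne : ∀ u, u ≠ x → (P ++ [x]).count u = P.count u := by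
        intro u hu
        rw [List.count_append]
        have : List.count u [x] = 0 := List.count_eq_zero.mpr (by simp [hu])
        omega
      have hngt : ¬ ((1 : Int) > bc) := by
        rw [hbc]
        omega
      have hstep : pvScanStep ((b, bc), (r, rc)) x = ((b, bc), (x, 1)) := by
        simp [pvScanStep, hbeq, hngt]
      rw [hstep]
      have hbx : b ≠ x := fun hh => hxP (hh ▸ hbmem)
      right
      refine ⟨by simp, by simp [hlast'], by simp [hcx], by simp [hbmem],
        by simp [hcne b hbx, hbc], ?_, ?_⟩
      · intro u hu
        rw [hcne b hbx]
        by_cases hux : u = x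
        · subst hux
          rw [hcx]
          omega
        · rw [hcne u hux]
          exact hmax u ((List.mem_append.mp hu).resolve_right (by simp [hux]))
      · intro u hu hc
        rw [hcne b hbx] at hc
        by_cases hux : u = x
        · subst hux
          exact hord b hbmem
        · rw [hcne u hux] at hc
          exact hmin u ((List.mem_append.mp hu).resolve_right (by simp [hux])) hc

theorem pvInv_foldl (S : List String) : ∀ (P : List String) (s : (String × Int) × (String × Int)),
    (P ++ S).Pairwise (· ≤ ·) → (∀ y ∈ S, y ≠ "") → pvInv P s →
    pvInv (P ++ S) (S.foldl pvScanStep s) := by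
  induction S with
  | nil => intro P s h _ hinv; simpa using hinv
  | cons x S' ih =>
    intro P s hsort hne hinv
    have hsort' : ((P ++ [x]) ++ S').Pairwise (· ≤ ·) := by simpa using hsort
    have hsP : P.Pairwise (· ≤ ·) := (List.pairwise_append.mp hsort).1
    have hord : ∀ y ∈ P, y ≤ x := by
      intro y hy
      exact (List.pairwise_append.mp hsort).2.2 y hy x (by simp)
    have hstep := pvInv_step P x (hne x (by simp)) hsP hord s hinv
    have := ih (P ++ [x]) (pvScanStep s x) hsort' (fun y hy => hne y (by simp [hy])) hstep
    simpa using this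

theorem B_best (T : List String) (hT : T ≠ []) (hne : ∀ y ∈ T, y ≠ "") :
    BestTok T
      (((PySem.List.sorted T (fun t => t) false).foldl pvScanStep (("", 0), ("", 0))).1.1) := by
  set S := PySem.List.sorted T (fun t => t) false with hS
  have hperm : S.Perm T := PySem.List.sorted_perm T (fun t => t) false
  have hsort : S.Pairwise (· ≤ ·) := PySem.List.sorted_pairwise T (fun t => t)
  have hneS : ∀ y ∈ S, y ≠ "" := fun y hy => hne y (hperm.mem_iff.mp hy)
  have hSne : S ≠ [] := by
    intro hnil
    exact hT ((PySem.List.sorted_eq_nil_iff _ _ _).mp hnil)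
  have hinv := pvInv_foldl S [] (("", 0), ("", 0)) (by simpa using hsort) hneS (Or.inl ⟨rfl, rfl⟩)
  simp only [List.nil_append] at hinv
  rcases hinv with ⟨hnil, _⟩ | ⟨_, _, _, hmem, _, hmax, hmin⟩
  · exact absurd hnil hSne
  · refine ⟨hperm.mem_iff.mp hmem, ?_, ?_⟩
    · intro u hu
      have := hmax u (hperm.mem_iff.mpr hu)
      rwa [hperm.count_eq, hperm.count_eq] at this
    · intro u hu hc
      exact hmin u (hperm.mem_iff.mpr hu) (by rw [hperm.count_eq, hperm.count_eq]; exact hc)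

-- ===== VERDICT (by name: the statement is the Claim_ definition above) =====
theorem transcript_feature_gene_token_spec : Claim_equal_transcript_feature_gene_token := by
  intro features _
  show transcript_feature_gene_token features = transcript_feature_gene_token_alt features
  unfold transcript_feature_gene_token transcript_feature_gene_token_alt
  rw [counts_eq, tokensB_eq]
  by_cases hnil : pvTokens features = []
  · rw [hnil]; rfl
  · have hsz : ¬ (PySem.Dict.counter (pvTokens features)).size = 0 := by
      rcases List.exists_cons_of_ne_nil hnil with ⟨t, T', hT'⟩
      have ht : t ∈ PySem.Set.ofList (pvTokens features) :=
        (PySem.Set.mem_ofList _ t).mpr (by simp [hT'])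
      have hlen : (PySem.Dict.counter (pvTokens features)).size
          = (PySem.Set.ofList (pvTokens features)).length := by
        simp [PySem.Dict.size, PySem.Dict.items_counter]
      rw [hlen]
      intro h0
      rw [List.length_eq_zero_iff.mp h0] at ht
      simp at ht
    rw [if_neg hsz]
    exact bestTok_unique (pvTokens features) _ _ (A_best _ hnil)
      (B_best _ hnil (pvTokens_ne_empty features))
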